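-- pv_equiv track=rewrite | github.com/keithlau2015/stream-deck | gui.py | trova_pulsante_click
-- ===== SOURCE A (Python) =====
-- BTN_SIZE = 100
--
-- SPACING_X = 140
--
-- SPACING_Y = 120
--
-- MARGIN_Y = 20
--
-- SCREEN_WIDTH = 640
--
-- def trova_pulsante_click(mx, my):
--     total_width = 3 * BTN_SIZE + 2 * (SPACING_X - BTN_SIZE)
--     start_x = (SCREEN_WIDTH - total_width) // 2
--
--     for i in range(9):
--         x = start_x + (i % 3) * SPACING_X
--         y = MARGIN_Y + (i // 3) * SPACING_Y
--         if x <= mx <= x + BTN_SIZE and y <= my <= y + BTN_SIZE: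
--             return f"BUTTON_{i+1}"
--     return None
-- ===== SOURCE B (Python) =====
-- BTN_SIZE = 100
-- SPACING_X = 140
-- SPACING_Y = 120
-- MARGIN_Y = 20
-- SCREEN_WIDTH = 640
--
-- def trova_pulsante_click(mx, my):
--     total_width = 3 * BTN_SIZE + 2 * (SPACING_X - BTN_SIZE)
--     start_x = (SCREEN_WIDTH - total_width) // 2
--     dx = mx - start_x
--     dy = my - MARGIN_Y
--     col = dx // SPACING_X
--     row = dy // SPACING_Y
--     if 0 <= col <= 2 and dx - col * SPACING_X <= BTN_SIZE and 0 <= row <= 2 and dy - row * SPACING_Y <= BTN_SIZE: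
--         return f"BUTTON_{row * 3 + col + 1}"
--     return None
-- ===== Notes on version B (the rewrite author's own statement) =====
-- stated objective: alternative
-- what changed: Replaces the loop over all 9 buttons with a closed-form computation: column and row are derived directly by floor division of the click offsets by the cell spacings, then validated against the grid bounds and the inclusive button size.
import Mathlib
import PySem

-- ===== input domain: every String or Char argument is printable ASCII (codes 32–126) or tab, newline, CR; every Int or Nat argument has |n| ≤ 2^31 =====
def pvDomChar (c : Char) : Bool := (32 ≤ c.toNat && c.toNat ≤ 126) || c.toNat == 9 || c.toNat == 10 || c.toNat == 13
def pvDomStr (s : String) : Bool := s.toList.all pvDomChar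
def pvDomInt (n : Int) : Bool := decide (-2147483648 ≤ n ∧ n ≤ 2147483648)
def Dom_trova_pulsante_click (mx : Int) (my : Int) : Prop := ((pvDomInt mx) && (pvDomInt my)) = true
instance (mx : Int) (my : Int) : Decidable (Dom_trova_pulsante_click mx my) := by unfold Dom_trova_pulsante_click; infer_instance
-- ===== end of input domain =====

-- B replaces A's loop over the 9 buttons by a closed-form column/row derivation via floor division (objective: alternative).

-- ===== PORT A =====
-- the body of A's 'for i in range(9): … return …' loop, as structural recursion over the range list
def pvALoop (mx my start_x : Int) : List Int → Option String
  | [] => none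
  | i :: rest =>
    let x := start_x + (PySem.Int.mod i 3) * 140
    let y := 20 + (PySem.Int.floordiv i 3) * 120
    if x ≤ mx ∧ mx ≤ x + 100 ∧ y ≤ my ∧ my ≤ y + 100 then
      some ("BUTTON_" ++ PySem.Int.toStr (i + 1))
    else pvALoop mx my start_x rest

def trova_pulsante_click (mx : Int) (my : Int) : Option String :=
  let total_width : Int := 3 * 100 + 2 * (140 - 100)
  let start_x := PySem.Int.floordiv (640 - total_width) 2
  pvALoop mx my start_x (PySem.List.pyRange 0 9 1)

-- ===== PORT B =====
def trova_pulsante_click_alt (mx : Int) (my : Int) : Option String :=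
  let total_width : Int := 3 * 100 + 2 * (140 - 100)
  let start_x := PySem.Int.floordiv (640 - total_width) 2
  let dx := mx - start_x
  let dy := my - 20
  let col := PySem.Int.floordiv dx 140
  let row := PySem.Int.floordiv dy 120
  if 0 ≤ col ∧ col ≤ 2 ∧ dx - col * 140 ≤ 100 ∧ 0 ≤ row ∧ row ≤ 2 ∧ dy - row * 120 ≤ 100 then
    some ("BUTTON_" ++ PySem.Int.toStr (row * 3 + col + 1))
  else none

-- ===== PRECONDITION & SPEC =====
def Spec_trova_pulsante_click (mx : Int) (my : Int) (out : Option String) : Prop := out = trova_pulsante_click_alt mx my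
instance (mx : Int) (my : Int) (out : Option String) : Decidable (Spec_trova_pulsante_click mx my out) := by unfold Spec_trova_pulsante_click; infer_instance

-- ===== CLAIM (what is proved, stated in full; the proofs are below) =====
def Claim_equal_trova_pulsante_click : Prop := ∀ (mx : Int) (my : Int), Dom_trova_pulsante_click mx my → Spec_trova_pulsante_click mx my (trova_pulsante_click mx my)

-- ===== LEMMAS AND PROOFS =====

-- A's loop, with the range list, start_x and all per-button coordinates evaluated out
theorem pvA_eval (mx my : Int) : trova_pulsante_click mx my =
    (if (130:Int) ≤ mx ∧ mx ≤ 230 ∧ (20:Int) ≤ my ∧ my ≤ 120 then some "BUTTON_1" else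
     if (270:Int) ≤ mx ∧ mx ≤ 370 ∧ (20:Int) ≤ my ∧ my ≤ 120 then some "BUTTON_2" else
     if (410:Int) ≤ mx ∧ mx ≤ 510 ∧ (20:Int) ≤ my ∧ my ≤ 120 then some "BUTTON_3" else
     if (130:Int) ≤ mx ∧ mx ≤ 230 ∧ (140:Int) ≤ my ∧ my ≤ 240 then some "BUTTON_4" else
     if (270:Int) ≤ mx ∧ mx ≤ 370 ∧ (140:Int) ≤ my ∧ my ≤ 240 then some "BUTTON_5" else
     if (410:Int) ≤ mx ∧ mx ≤ 510 ∧ (140:Int) ≤ my ∧ my ≤ 240 then some "BUTTON_6" else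
     if (130:Int) ≤ mx ∧ mx ≤ 230 ∧ (260:Int) ≤ my ∧ my ≤ 360 then some "BUTTON_7" else
     if (270:Int) ≤ mx ∧ mx ≤ 370 ∧ (260:Int) ≤ my ∧ my ≤ 360 then some "BUTTON_8" else
     if (410:Int) ≤ mx ∧ mx ≤ 510 ∧ (260:Int) ≤ my ∧ my ≤ 360 then some "BUTTON_9" else
     none) := by
  rfl

-- B, with start_x evaluated out
theorem pvB_eval (mx my : Int) : trova_pulsante_click_alt mx my =
    (if 0 ≤ PySem.Int.floordiv (mx - 130) 140 ∧ PySem.Int.floordiv (mx - 130) 140 ≤ 2 ∧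
        (mx - 130) - PySem.Int.floordiv (mx - 130) 140 * 140 ≤ 100 ∧
        0 ≤ PySem.Int.floordiv (my - 20) 120 ∧ PySem.Int.floordiv (my - 20) 120 ≤ 2 ∧
        (my - 20) - PySem.Int.floordiv (my - 20) 120 * 120 ≤ 100 then
       some ("BUTTON_" ++ PySem.Int.toStr (PySem.Int.floordiv (my - 20) 120 * 3 + PySem.Int.floordiv (mx - 130) 140 + 1))
     else none) := by
  rfl

-- ===== VERDICT (by name: the statement is the Claim_ definition above) =====
theorem trova_pulsante_click_spec : Claim_equal_trova_pulsante_click := by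
  intro mx my _
  show trova_pulsante_click mx my = trova_pulsante_click_alt mx my
  rw [pvA_eval]
  have h140 : (0:Int) < 140 := by norm_num
  have h120 : (0:Int) < 120 := by norm_num
  split_ifs with h1 h2 h3 h4 h5 h6 h7 h8 h9
  · have hc : PySem.Int.floordiv (mx - 130) 140 = 0 := (PySem.Int.floordiv_eq_iff_of_pos h140).mpr ⟨by omega, by omega⟩
    have hr : PySem.Int.floordiv (my - 20) 120 = 0 := (PySem.Int.floordiv_eq_iff_of_pos h120).mpr ⟨by omega, by omega⟩
    rw [pvB_eval, hc, hr]
    split_ifs with hb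
    · rfl
    · exact (hb ⟨by omega, by omega, by omega, by omega, by omega, by omega⟩).elim
  · have hc : PySem.Int.floordiv (mx - 130) 140 = 1 := (PySem.Int.floordiv_eq_iff_of_pos h140).mpr ⟨by omega, by omega⟩
    have hr : PySem.Int.floordiv (my - 20) 120 = 0 := (PySem.Int.floordiv_eq_iff_of_pos h120).mpr ⟨by omega, by omega⟩
    rw [pvB_eval, hc, hr]
    split_ifs with hb
    · rfl
    · exact (hb ⟨by omega, by omega, by omega, by omega, by omega, by omega⟩).elim
  · have hc : PySem.Int.floordiv (mx - 130) 140 = 2 := (PySem.Int.floordiv_eq_iff_of_pos h140).mpr ⟨by omega, by omega⟩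
    have hr : PySem.Int.floordiv (my - 20) 120 = 0 := (PySem.Int.floordiv_eq_iff_of_pos h120).mpr ⟨by omega, by omega⟩
    rw [pvB_eval, hc, hr]
    split_ifs with hb
    · rfl
    · exact (hb ⟨by omega, by omega, by omega, by omega, by omega, by omega⟩).elim
  · have hc : PySem.Int.floordiv (mx - 130) 140 = 0 := (PySem.Int.floordiv_eq_iff_of_pos h140).mpr ⟨by omega, by omega⟩
    have hr : PySem.Int.floordiv (my - 20) 120 = 1 := (PySem.Int.floordiv_eq_iff_of_pos h120).mpr ⟨by omega, by omega⟩
    rw [pvB_eval, hc, hr]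
    split_ifs with hb
    · rfl
    · exact (hb ⟨by omega, by omega, by omega, by omega, by omega, by omega⟩).elim
  · have hc : PySem.Int.floordiv (mx - 130) 140 = 1 := (PySem.Int.floordiv_eq_iff_of_pos h140).mpr ⟨by omega, by omega⟩
    have hr : PySem.Int.floordiv (my - 20) 120 = 1 := (PySem.Int.floordiv_eq_iff_of_pos h120).mpr ⟨by omega, by omega⟩
    rw [pvB_eval, hc, hr]
    split_ifs with hb
    · rfl
    · exact (hb ⟨by omega, by omega, by omega, by omega, by omega, by omega⟩).elim
  · have hc : PySem.Int.floordiv (mx - 130) 140 = 2 := (PySem.Int.floordiv_eq_iff_of_pos h140).mpr ⟨by omega, by omega⟩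
    have hr : PySem.Int.floordiv (my - 20) 120 = 1 := (PySem.Int.floordiv_eq_iff_of_pos h120).mpr ⟨by omega, by omega⟩
    rw [pvB_eval, hc, hr]
    split_ifs with hb
    · rfl
    · exact (hb ⟨by omega, by omega, by omega, by omega, by omega, by omega⟩).elim
  · have hc : PySem.Int.floordiv (mx - 130) 140 = 0 := (PySem.Int.floordiv_eq_iff_of_pos h140).mpr ⟨by omega, by omega⟩
    have hr : PySem.Int.floordiv (my - 20) 120 = 2 := (PySem.Int.floordiv_eq_iff_of_pos h120).mpr ⟨by omega, by omega⟩
    rw [pvB_eval, hc, hr]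
    split_ifs with hb
    · rfl
    · exact (hb ⟨by omega, by omega, by omega, by omega, by omega, by omega⟩).elim
  · have hc : PySem.Int.floordiv (mx - 130) 140 = 1 := (PySem.Int.floordiv_eq_iff_of_pos h140).mpr ⟨by omega, by omega⟩
    have hr : PySem.Int.floordiv (my - 20) 120 = 2 := (PySem.Int.floordiv_eq_iff_of_pos h120).mpr ⟨by omega, by omega⟩
    rw [pvB_eval, hc, hr]
    split_ifs with hb
    · rfl
    · exact (hb ⟨by omega, by omega, by omega, by omega, by omega, by omega⟩).elim
  · have hc : PySem.Int.floordiv (mx - 130) 140 = 2 := (PySem.Int.floordiv_eq_iff_of_pos h140).mpr ⟨by omega, by omega⟩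
    have hr : PySem.Int.floordiv (my - 20) 120 = 2 := (PySem.Int.floordiv_eq_iff_of_pos h120).mpr ⟨by omega, by omega⟩
    rw [pvB_eval, hc, hr]
    split_ifs with hb
    · rfl
    · exact (hb ⟨by omega, by omega, by omega, by omega, by omega, by omega⟩).elim
  · obtain ⟨c, hc⟩ : ∃ c, PySem.Int.floordiv (mx - 130) 140 = c := ⟨_, rfl⟩
    obtain ⟨r, hr⟩ : ∃ r, PySem.Int.floordiv (my - 20) 120 = r := ⟨_, rfl⟩
    have hcb := (PySem.Int.floordiv_eq_iff_of_pos h140).mp hc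
    have hrb := (PySem.Int.floordiv_eq_iff_of_pos h120).mp hr
    rw [pvB_eval, hc, hr, if_neg]
    rintro ⟨hc0, hc2, hcd, hr0, hr2, hrd⟩
    have h3c : c = 0 ∨ c = 1 ∨ c = 2 := by omega
    have h3r : r = 0 ∨ r = 1 ∨ r = 2 := by omega
    rcases h3c with rfl | rfl | rfl <;> rcases h3r with rfl | rfl | rfl <;> omega
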